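-- pv_equiv track=rewrite | github.com/vm6u6/DSA | DP(delete_and_earn).py | sum_same
-- ===== SOURCE A (Python) =====
-- def sum_same( tmp ):
--     val = []
--     idx = []
--     cnt = 0
--     tmp = sorted(tmp)
--     for i in range( len(tmp) ):
--         if (cnt == 0):
--             cnt = tmp[i]
--
--         if (i == (len(tmp)-1)):
--             val.append(cnt)
--             idx.append(tmp[i])
--             return val, idx
--
--         if ( tmp[i] == tmp[i+1] ):
--             cnt = cnt + tmp[i]
--         else:
--             val.append(cnt)
--             idx.append(tmp[i])
--             cnt = 0
-- ===== SOURCE B (Python) =====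
-- def sum_same(tmp):
--     counts = {}
--     for x in tmp:
--         counts[x] = counts.get(x, 0) + 1
--     keys = sorted(counts)
--     return [v * counts[v] for v in keys], keys
-- ===== Notes on version B (the rewrite author's own statement) =====
-- stated objective: idiomatic
-- what changed: B builds a frequency table in one pass and maps each sorted distinct key to value*count, replacing A's sort-then-adjacent-scan with a running accumulator and lookahead.
-- outside the precondition, e.g. on sum_same([]): A returns None, B returns ([], [])
import Mathlib
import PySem

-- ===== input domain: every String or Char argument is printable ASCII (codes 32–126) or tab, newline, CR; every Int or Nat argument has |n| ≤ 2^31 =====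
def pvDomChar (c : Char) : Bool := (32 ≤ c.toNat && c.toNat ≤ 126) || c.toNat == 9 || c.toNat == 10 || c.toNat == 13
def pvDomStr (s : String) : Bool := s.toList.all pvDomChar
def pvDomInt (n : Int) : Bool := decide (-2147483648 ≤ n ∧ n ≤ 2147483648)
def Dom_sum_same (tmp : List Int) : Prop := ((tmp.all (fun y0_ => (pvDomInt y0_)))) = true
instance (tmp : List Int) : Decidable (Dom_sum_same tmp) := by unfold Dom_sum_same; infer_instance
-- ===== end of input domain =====

-- B replaces A's sort-then-adjacent-scan (running accumulator with lookahead) by a one-pass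
-- frequency table whose sorted keys are mapped to value*count (objective: idiomatic).

-- ===== PORT A =====
-- A's for-loop over the indices of the sorted list, carrying (val, idx, cnt); the index i
-- with its tmp[i] / tmp[i+1] accesses and the 'i == len(tmp)-1' test become the three list
-- patterns (empty / last element / element with a successor), each a step-for-step copy of
-- the loop body.
def sumSameLoopA (val idx : List Int) (cnt : Int) : List Int → List Int × List Int
  | [] => (val, idx)
  | [x] =>
      let cnt := if cnt = 0 then x else cnt
      (val ++ [cnt], idx ++ [x])
  | x :: y :: rest =>
      let cnt := if cnt = 0 then x else cnt
      if x = y then sumSameLoopA val idx (cnt + x) (y :: rest)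
      else sumSameLoopA (val ++ [cnt]) (idx ++ [x]) 0 (y :: rest)

def sum_same (tmp : List Int) : List Int × List Int :=
  sumSameLoopA [] [] 0 (PySem.List.sorted tmp (fun v => v) false)

-- ===== PORT B =====
def sum_same_alt (tmp : List Int) : List Int × List Int :=
  let counts := tmp.foldl (fun d x => d.insert x (d.getD x 0 + 1)) (PySem.Dict.empty)
  let keys := PySem.List.sorted counts.keys (fun v => v) false
  (keys.map (fun v => v * counts.getD v 0), keys)

-- ===== PRECONDITION & SPEC =====
-- Pre_ excludes only the empty list: there A's loop body never runs and A falls through,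
-- returning None instead of a pair of lists.
def Pre_sum_same (tmp : List Int) : Prop := tmp ≠ []
instance (tmp : List Int) : Decidable (Pre_sum_same tmp) := by unfold Pre_sum_same; infer_instance

def pvWitness_sum_same : List Int := [2, 2, 3, -1, 0, 0]

def Spec_sum_same (tmp : List Int) (out : List Int × List Int) : Prop := out = sum_same_alt tmp
instance (tmp : List Int) (out : List Int × List Int) : Decidable (Spec_sum_same tmp out) := by unfold Spec_sum_same; infer_instance

-- ===== CLAIM (what is proved, stated in full; the proofs are below) =====
def Claim_equal_sum_same : Prop := ∀ (tmp : List Int), Dom_sum_same tmp → Pre_sum_same tmp → Spec_sum_same tmp (sum_same tmp)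

-- ===== LEMMAS AND PROOFS =====

-- canonical form both sides are reduced to: one entry per maximal run of equal heads
def canonGroups : List Int → List Int × List Int
  | [] => ([], [])
  | x :: s =>
      let r := canonGroups (s.dropWhile (· == x))
      ((((s.takeWhile (· == x)).length + 1 : Int) * x) :: r.1, x :: r.2)
termination_by s => s.length
decreasing_by
  have := List.length_dropWhile_le (p := (· == x)) (l := s)
  simp
  omega

theorem sumSameLoopA_gen (s : List Int) : ∀ (x c : Int) (val idx : List Int),
    (c = 0 ∨ ∃ j : Nat, 1 ≤ j ∧ c = (j : Int) * x) →
    sumSameLoopA val idx c (x :: s) =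
      (val ++ ((if c = 0 then x else c) + ((s.takeWhile (· == x)).length : Int) * x)
            :: (canonGroups (s.dropWhile (· == x))).1,
       idx ++ x :: (canonGroups (s.dropWhile (· == x))).2) := by
  induction s with
  | nil =>
      intro x c val idx _
      show (val ++ [if c = 0 then x else c], idx ++ [x]) = _
      simp only [List.takeWhile_nil, List.dropWhile_nil]
      rw [canonGroups.eq_1]
      simp
  | cons y rest ih =>
      intro x c val idx hc
      obtain ⟨j, hj, hjx⟩ : ∃ j : Nat, 1 ≤ j ∧ (if c = 0 then x else c) = (j : Int) * x := by
        rcases hc with h0 | ⟨j, hj, hcx⟩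
        · exact ⟨1, le_refl 1, by rw [if_pos h0]; ring⟩
        · by_cases h : c = 0
          · exact ⟨1, le_refl 1, by rw [if_pos h]; ring⟩
          · exact ⟨j, hj, by rw [if_neg h]; exact hcx⟩
      by_cases hxy : x = y
      · subst hxy
        have hstep : sumSameLoopA val idx c (x :: x :: rest)
            = sumSameLoopA val idx ((if c = 0 then x else c) + x) (x :: rest) := by
          simp [sumSameLoopA]
        rw [hstep, ih x ((if c = 0 then x else c) + x) val idx
            (Or.inr ⟨j + 1, by omega, by rw [hjx]; push_cast; ring⟩)]
        have hif : (if (if c = 0 then x else c) + x = 0 then x else (if c = 0 then x else c) + x)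
            = (if c = 0 then x else c) + x := by
          by_cases hx0 : x = 0
          · by_cases h0 : (if c = 0 then x else c) + x = 0
            · rw [if_pos h0, h0, hx0]
            · rw [if_neg h0]
          · have hne : (if c = 0 then x else c) + x ≠ 0 := by
              have heq : (if c = 0 then x else c) + x = ((j : Int) + 1) * x := by
                rw [hjx]; ring
              rw [heq]
              exact mul_ne_zero (by positivity) hx0
            rw [if_neg hne]
        rw [hif]
        rw [List.takeWhile_cons_of_pos (by simp), List.dropWhile_cons_of_pos (by simp)]
        refine Prod.ext ?_ rfl
        simp only [List.length_cons]
        congr 2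
        push_cast
        ring
      · have hpy : ¬((y == x) = true) := by simp [Ne.symm hxy]
        have hstep : sumSameLoopA val idx c (x :: y :: rest)
            = sumSameLoopA (val ++ [if c = 0 then x else c]) (idx ++ [x]) 0 (y :: rest) := by
          simp [sumSameLoopA, hxy]
        rw [hstep, ih y 0 _ _ (Or.inl rfl)]
        rw [List.takeWhile_cons_of_neg (p := fun z => z == x) (l := rest) hpy,
          List.dropWhile_cons_of_neg (p := fun z => z == x) (l := rest) hpy,
          canonGroups.eq_2]
        refine Prod.ext ?_ ?_ <;> simp only [] <;> rw [List.append_assoc] <;> simp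
        ring

theorem sum_same_eq_canon (tmp : List Int) (h : tmp ≠ []) :
    sum_same tmp = canonGroups (PySem.List.sorted tmp (fun v => v) false) := by
  unfold sum_same
  cases hs : PySem.List.sorted tmp (fun v => v) false with
  | nil => exact absurd ((PySem.List.sorted_eq_nil_iff tmp (fun v => v) false).mp hs) h
  | cons x s =>
      rw [sumSameLoopA_gen s x 0 [] [] (Or.inl rfl), canonGroups.eq_2]
      simp
      ring

theorem canonGroups_mem (s : List Int) : ∀ v, v ∈ (canonGroups s).2 ↔ v ∈ s := by
  induction s using canonGroups.induct with
  | case1 => simp [canonGroups.eq_1]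
  | case2 x s ih =>
      intro v
      rw [canonGroups.eq_2]
      simp only [List.mem_cons]
      constructor
      · rintro (rfl | hv)
        · exact Or.inl rfl
        · exact Or.inr ((List.dropWhile_sublist (p := (· == x)) (l := s)).mem ((ih v).mp hv))
      · rintro (rfl | hv)
        · exact Or.inl rfl
        · by_cases hvx : v = x
          · exact Or.inl hvx
          · right
            rw [ih v]
            rw [← List.takeWhile_append_dropWhile (p := (· == x)) (l := s)] at hv
            rcases List.mem_append.mp hv with h | h
            · exact absurd (by simpa using List.mem_takeWhile_imp h) hvx
            · exact h

theorem sorted_dropWhile_not_mem (x : Int) (s : List Int)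
    (hs : (x :: s).Pairwise (· ≤ ·)) : x ∉ s.dropWhile (· == x) := by
  intro hmem
  cases hd : s.dropWhile (· == x) with
  | nil => simp [hd] at hmem
  | cons y t =>
      have hyx : y ≠ x := by
        have h1 : ∀ (hne : s.dropWhile (· == x) ≠ []), ((s.dropWhile (· == x)).head hne == x) = false :=
          fun hne => List.head_dropWhile_not _ hne
        simp only [hd] at h1
        simpa using h1 (by simp)
      have hsub : (y :: t).Sublist s := hd ▸ List.dropWhile_sublist _
      have hps : (y :: t).Pairwise (· ≤ ·) := (List.pairwise_cons.mp hs).2.sublist hsub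
      have hxy : x ≤ y := (List.pairwise_cons.mp hs).1 y (hsub.mem (by simp))
      have hylt : x < y := lt_of_le_of_ne hxy (Ne.symm hyx)
      rw [hd] at hmem
      rcases List.mem_cons.mp hmem with rfl | hx
      · omega
      · have := (List.pairwise_cons.mp hps).1 x hx
        omega

theorem canonGroups_pairwise (s : List Int) (hs : s.Pairwise (· ≤ ·)) :
    (canonGroups s).2.Pairwise (· < ·) := by
  induction s using canonGroups.induct with
  | case1 => simp [canonGroups.eq_1]
  | case2 x s ih =>
      rw [canonGroups.eq_2]
      simp only [List.pairwise_cons]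
      have hsub : (s.dropWhile (· == x)).Sublist s := List.dropWhile_sublist _
      have htail : (s.dropWhile (· == x)).Pairwise (· ≤ ·) :=
        (List.pairwise_cons.mp hs).2.sublist hsub
      refine ⟨?_, ih htail⟩
      intro v hv
      have hvmem : v ∈ s.dropWhile (· == x) := (canonGroups_mem _ v).mp hv
      have hvx : v ≠ x := fun h => sorted_dropWhile_not_mem x s hs (h ▸ hvmem)
      have hxv : x ≤ v := (List.pairwise_cons.mp hs).1 v (hsub.mem hvmem)
      exact lt_of_le_of_ne hxv (Ne.symm hvx)

theorem canonGroups_fst (s : List Int) (hs : s.Pairwise (· ≤ ·)) :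
    (canonGroups s).1 = (canonGroups s).2.map (fun v => v * (s.count v : Int)) := by
  induction s using canonGroups.induct with
  | case1 => simp [canonGroups.eq_1]
  | case2 x s ih =>
      have hsub : (s.dropWhile (· == x)).Sublist s := List.dropWhile_sublist _
      have htail : (s.dropWhile (· == x)).Pairwise (· ≤ ·) :=
        (List.pairwise_cons.mp hs).2.sublist hsub
      rw [canonGroups.eq_2]
      simp only [List.map_cons, List.cons.injEq]
      constructor
      · have hx : (x :: s).count x = (s.takeWhile (· == x)).length + 1 := by
          rw [List.count_cons_self]
          congr 1
          conv_lhs => rw [← List.takeWhile_append_dropWhile (p := (· == x)) (l := s)]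
          have h1 : (s.takeWhile (· == x)).count x = (s.takeWhile (· == x)).length :=
            List.count_eq_length.mpr (fun y hy =>
              (beq_iff_eq.mp (List.mem_takeWhile_imp (p := (· == x)) (l := s) hy)).symm)
          have h2 : (s.dropWhile (· == x)).count x = 0 :=
            List.count_eq_zero.mpr (sorted_dropWhile_not_mem x s hs)
          rw [List.count_append, h1, h2, Nat.add_zero]
        rw [hx]; push_cast; ring
      · rw [ih htail]
        apply List.map_congr_left
        intro v hv
        have hvmem : v ∈ s.dropWhile (· == x) := (canonGroups_mem _ v).mp hv
        have hvx : v ≠ x := fun h => sorted_dropWhile_not_mem x s hs (h ▸ hvmem)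
        have hcnt : (s.dropWhile (· == x)).count v = (x :: s).count v := by
          rw [List.count_cons_of_ne (a := v) (b := x) (Ne.symm hvx)]
          conv_rhs => rw [← List.takeWhile_append_dropWhile (p := (· == x)) (l := s)]
          have h1 : (s.takeWhile (· == x)).count v = 0 :=
            List.count_eq_zero.mpr (fun hy =>
              hvx (beq_iff_eq.mp (List.mem_takeWhile_imp (p := (· == x)) (l := s) hy)))
          rw [List.count_append, h1]
          omega
        rw [hcnt]

theorem keys_sorted_eq_canon (tmp : List Int) :
    PySem.List.sorted (PySem.Set.ofList tmp) (fun v => v) false =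
      (canonGroups (PySem.List.sorted tmp (fun v => v) false)).2 := by
  set s := PySem.List.sorted tmp (fun v => v) false with hsdef
  have hs : s.Pairwise (· ≤ ·) := by
    simpa using PySem.List.sorted_pairwise tmp (fun v => v)
  have hperm : s.Perm tmp := PySem.List.sorted_perm tmp _ _
  apply PySem.List.sorted_eq_of_perm_of_pairwise_lt
  · have hnd1 : (canonGroups s).2.Nodup :=
      List.Pairwise.imp (fun hlt => ne_of_lt hlt) (canonGroups_pairwise s hs)
    have hnd2 : (PySem.Set.ofList tmp).Nodup := PySem.Set.nodup_ofList tmp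
    rw [List.perm_ext_iff_of_nodup hnd1 hnd2]
    intro v
    rw [canonGroups_mem s v, PySem.Set.mem_ofList]
    exact hperm.mem_iff
  · simpa using canonGroups_pairwise s hs

-- ===== VERDICT (by name: the statement is the Claim_ definition above) =====
theorem sum_same_spec : Claim_equal_sum_same := by
  intro tmp _ hpre
  unfold Spec_sum_same
  unfold sum_same_alt
  simp only [PySem.Dict.foldl_insert_getD_add_one_eq_counter, PySem.Dict.keys_counter,
    PySem.Dict.getD_counter]
  rw [sum_same_eq_canon tmp hpre, keys_sorted_eq_canon]
  set s := PySem.List.sorted tmp (fun v => v) false with hsdef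
  have hs : s.Pairwise (· ≤ ·) := by
    simpa using PySem.List.sorted_pairwise tmp (fun v => v)
  have hperm : s.Perm tmp := PySem.List.sorted_perm tmp _ _
  refine Prod.ext ?_ rfl
  rw [canonGroups_fst s hs]
  apply List.map_congr_left
  intro v _
  rw [hperm.count_eq]
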